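-- pv_equiv track=rewrite | github.com/PythonLebo/Programmeerimine-Python | Tarkvaraarendus (VG-1)/3.3f Anagrammi otsing.py | leidub_anagramm
-- ===== SOURCE A (Python) =====
-- def val(char):
--     return sum(bytearray(char,"UTF-8"))
--
-- def leidub_anagramm(t):
--     for i in t:
--         for k,v in enumerate(i):
--             if len(i) == 1:
--                 if val(v) == 0:
--                     return True
--             else:
--                 if k == 0:
--                     if val(v) == val(i[k+1]):
--                         return True
--                 elif k == len(i)-1:
--                     if val(v) == val(i[k-1]):
--                         return True
--                 elif val(v) == val(i[k-1]) + val(i[k+1]):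
--                     return True
--     return False
-- ===== SOURCE B (Python) =====
-- def val(char):
--     return sum(bytearray(char, "UTF-8"))
--
-- def _hit(vals):
--     if len(vals) == 1:
--         return vals[0] == 0
--     # difference-table reformulation: the edge equalities are zero first
--     # differences, and v[k] == v[k-1] + v[k+1]  <=>  v[k+1] == v[k] - v[k-1]
--     diffs = [b - a for a, b in zip(vals, vals[1:])]
--     return bool(diffs) and (diffs[0] == 0 or diffs[-1] == 0
--                             or any(x == d for d, x in zip(diffs, vals[2:])))
--
-- def leidub_anagramm(t):
--     return any(_hit([val(s) for s in i]) for i in t)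
-- ===== Notes on version B (the rewrite author's own statement) =====
-- stated objective: alternative
-- what changed: B reformulates the predicate algebraically over a first-difference table built once per inner list: the edge equalities become zero differences (diffs[0]==0 or diffs[-1]==0) and the middle condition v[k]==v[k-1]+v[k+1] becomes v[k+1]==diffs[k-1], so B never compares raw neighbor values or recomputes val().
import Mathlib
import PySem

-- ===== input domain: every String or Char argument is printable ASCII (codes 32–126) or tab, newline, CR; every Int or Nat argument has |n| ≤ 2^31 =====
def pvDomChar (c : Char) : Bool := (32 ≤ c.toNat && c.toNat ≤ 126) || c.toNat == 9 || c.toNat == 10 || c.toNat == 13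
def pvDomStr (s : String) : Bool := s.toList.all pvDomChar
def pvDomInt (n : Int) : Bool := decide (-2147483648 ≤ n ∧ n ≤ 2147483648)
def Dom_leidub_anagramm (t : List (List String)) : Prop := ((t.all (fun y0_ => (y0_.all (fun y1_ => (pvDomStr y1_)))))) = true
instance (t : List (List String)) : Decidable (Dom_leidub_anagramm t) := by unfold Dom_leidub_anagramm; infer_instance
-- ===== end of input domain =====

-- B reformulates the check over a first-difference table built once per inner list (objective: alternative, same cost).

-- val(char): sum of UTF-8 bytes; on the ASCII domain this is exactly the sum of code points
def pvVal (s : String) : Int := (s.toList.map (fun c => (c.toNat : Int))).sum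

-- ===== PORT A =====
-- inner scan of A: all index accesses are guarded in range in Python, so pyGetD's default is never used
def leidub_anagramm (t : List (List String)) : Bool :=
  t.any (fun i =>
    (PySem.List.enumerate i).any (fun kv =>
      let k := kv.1
      let v := kv.2
      if i.length == 1 then
        pvVal v == 0
      else if k == 0 then
        pvVal v == pvVal (PySem.List.pyGetD i (k + 1) "")
      else if k == (i.length : Int) - 1 then
        pvVal v == pvVal (PySem.List.pyGetD i (k - 1) "")
      else
        pvVal v == pvVal (PySem.List.pyGetD i (k - 1) "") + pvVal (PySem.List.pyGetD i (k + 1) "")))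

-- ===== PORT B =====
-- _hit(vals) of Source B: difference table; diffs[0]/diffs[-1] via pyGetD (guarded nonempty, as in Python)
def pvHit (vals : List Int) : Bool :=
  if vals.length == 1 then
    PySem.List.pyGetD vals 0 0 == 0
  else
    let diffs := (vals.zip (PySem.List.slice vals (some 1) none)).map (fun p => p.2 - p.1)
    !diffs.isEmpty &&
      (PySem.List.pyGetD diffs 0 0 == 0 || PySem.List.pyGetD diffs (-1) 0 == 0 ||
        (diffs.zip (PySem.List.slice vals (some 2) none)).any (fun p => p.2 == p.1))

def leidub_anagramm_alt (t : List (List String)) : Bool :=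
  t.any (fun i => pvHit (i.map pvVal))

-- ===== PRECONDITION & SPEC =====
def Spec_leidub_anagramm (t : List (List String)) (out : Bool) : Prop := out = leidub_anagramm_alt t
instance (t : List (List String)) (out : Bool) : Decidable (Spec_leidub_anagramm t out) := by unfold Spec_leidub_anagramm; infer_instance

-- ===== CLAIM (what is proved, stated in full; the proofs are below) =====
def Claim_equal_leidub_anagramm : Prop := ∀ (t : List (List String)), Dom_leidub_anagramm t → Spec_leidub_anagramm t (leidub_anagramm t)

-- ===== LEMMAS AND PROOFS =====

-- the common characterisation: first pair equal, last pair equal, or a middle neighbor-sum hit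
def pvP (vals : List Int) : Prop :=
  vals.getD 0 0 = vals.getD 1 0 ∨
  vals.getD (vals.length - 1) 0 = vals.getD (vals.length - 2) 0 ∨
  ∃ j, j + 2 < vals.length ∧ vals.getD j 0 + vals.getD (j + 2) 0 = vals.getD (j + 1) 0

theorem any_enumerate_iff {α : Type} (xs : List α) (f : Int × α → Bool) :
    ((PySem.List.enumerate xs).any f = true) ↔ ∃ (k : Nat) (h : k < xs.length), f ((k : Int), xs[k]) = true := by
  rw [List.any_eq_true]
  constructor
  · rintro ⟨p, hp, hf⟩
    obtain ⟨k, h, rfl⟩ := (PySem.List.mem_enumerate_iff xs 0 p).1 hp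
    exact ⟨k, h, by simpa using hf⟩
  · rintro ⟨k, h, hf⟩
    exact ⟨((k : Int), xs[k]), (PySem.List.mem_enumerate_iff xs 0 _).2 ⟨k, h, by simp⟩, hf⟩

theorem slicek_eq (vals : List Int) (k : Nat) : PySem.List.slice vals (some (k:Int)) none = vals.drop k := by
  simp [PySem.List.slice]
  rw [List.take_of_length_le (by simp)]
  rcases Nat.le_total k vals.length with h | h
  · rw [Nat.min_eq_left h]
  · rw [Nat.min_eq_right h, List.drop_of_length_le h, List.drop_of_length_le (le_refl _)]

theorem slice1_eq (vals : List Int) : PySem.List.slice vals (some 1) none = vals.drop 1 := by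
  have := slicek_eq vals 1
  norm_num at this
  rw [List.drop_one]
  exact this

theorem slice2_eq (vals : List Int) : PySem.List.slice vals (some 2) none = vals.drop 2 := by
  have := slicek_eq vals 2
  norm_num at this
  exact this

theorem pyGetD_val (xs : List String) (j : Nat) (h : j < xs.length) :
    pvVal (PySem.List.pyGetD xs (j : Int) "") = (xs.map pvVal).getD j 0 := by
  rw [PySem.List.pyGetD_natCast,
      List.getD_eq_getElem xs _ h, List.getD_eq_getElem _ _ (by simpa using h),
      List.getElem_map]

-- B side: pvHit on a list of length ≥ 2 is the characterisation pvP
theorem pvHit_iff (vals : List Int) (hlen : 2 ≤ vals.length) :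
    pvHit vals = true ↔ pvP vals := by
  have h1 : (vals.length == 1) = false := by simp; omega
  unfold pvHit
  rw [h1, slice1_eq, slice2_eq]
  simp only [Bool.false_eq_true, if_false]
  set diffs := ((vals.zip (vals.drop 1)).map (fun p => p.2 - p.1)) with hd
  have hld : diffs.length = vals.length - 1 := by
    simp [hd]
  have hget : ∀ j, j < vals.length - 1 → diffs.getD j 0 = vals.getD (j+1) 0 - vals.getD j 0 := by
    intro j hj
    have h1j : 1 + j = j + 1 := by omega
    rw [List.getD_eq_getElem _ _ (by omega)]
    simp only [hd, List.getElem_map, List.getElem_zip, List.getElem_drop]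
    rw [List.getD_eq_getElem _ _ (by omega), List.getD_eq_getElem _ _ (by omega)]
    simp [h1j]
  have hne : diffs.isEmpty = false := by
    rcases hdf : diffs with _ | ⟨x, xs⟩
    · rw [hdf] at hld; simp at hld; omega
    · rfl
  have hg0 : PySem.List.pyGetD diffs 0 0 = diffs.getD 0 0 := PySem.List.pyGetD_zero diffs 0
  have hgneg : PySem.List.pyGetD diffs (-1) 0 = diffs.getD (diffs.length - 1) 0 := by
    rw [PySem.List.pyGetD_neg_ofNat diffs 1 0 (by omega) (by omega),
        List.getD_eq_getElem _ _ (by omega)]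
  have e1 : (diffs.getD 0 0 = 0) ↔ vals.getD 0 0 = vals.getD 1 0 := by
    rw [hget 0 (by omega)]
    simp only [Nat.zero_add]
    constructor <;> (intro h; omega)
  have e2 : (diffs.getD (diffs.length - 1) 0 = 0) ↔
      vals.getD (vals.length - 1) 0 = vals.getD (vals.length - 2) 0 := by
    rw [hld, show vals.length - 1 - 1 = vals.length - 2 from by omega,
        hget (vals.length - 2) (by omega),
        show vals.length - 2 + 1 = vals.length - 1 from by omega]
    constructor <;> (intro h; omega)
  have e3 : ((diffs.zip (vals.drop 2)).any (fun p => p.2 == p.1) = true) ↔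
      ∃ j, j + 2 < vals.length ∧ vals.getD j 0 + vals.getD (j + 2) 0 = vals.getD (j + 1) 0 := by
    rw [List.any_eq_true]
    constructor
    · rintro ⟨p, hp, hf⟩
      obtain ⟨j, hj, rfl⟩ := List.mem_iff_getElem.1 hp
      simp only [List.length_zip, List.length_drop, hld] at hj
      have h2 : j + 2 < vals.length := by omega
      refine ⟨j, h2, ?_⟩
      simp only [List.getElem_zip, List.getElem_drop, beq_iff_eq] at hf
      have e : vals.getD (2 + j) 0 = diffs.getD j 0 := by
        rw [List.getD_eq_getElem _ _ (by omega), List.getD_eq_getElem _ _ (by omega)]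
        exact hf
      rw [show 2 + j = j + 2 from by omega, hget j (by omega)] at e
      omega
    · rintro ⟨j, h2, hf⟩
      refine ⟨(diffs[j]'(by omega), (vals.drop 2)[j]'(by simp; omega)), ?_, ?_⟩
      · rw [List.mem_iff_getElem]
        exact ⟨j, by simp [hld]; omega, by simp [List.getElem_zip]⟩
      · simp only [List.getElem_drop, beq_iff_eq]
        have ea : vals.getD (2 + j) 0 = vals[2 + j]'(by omega) :=
          List.getD_eq_getElem _ _ (by omega)
        have eb : diffs.getD j 0 = diffs[j]'(by omega) :=
          List.getD_eq_getElem _ _ (by omega)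
        rw [← ea, ← eb, show 2 + j = j + 2 from by omega, hget j (by omega)]
        omega
  rw [hne]
  simp only [Bool.not_false, Bool.true_and, Bool.or_eq_true, beq_iff_eq, hg0, hgneg]
  unfold pvP
  rw [e1, e2, e3]
  tauto

-- A side: the enumerate scan on a list of length ≥ 2 is the same characterisation on the value table
theorem A_any_iff (xs : List String) (hlen : 2 ≤ xs.length) :
    ((PySem.List.enumerate xs).any (fun kv =>
      let k := kv.1
      let v := kv.2
      if xs.length == 1 then
        pvVal v == 0
      else if k == 0 then
        pvVal v == pvVal (PySem.List.pyGetD xs (k + 1) "")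
      else if k == (xs.length : Int) - 1 then
        pvVal v == pvVal (PySem.List.pyGetD xs (k - 1) "")
      else
        pvVal v == pvVal (PySem.List.pyGetD xs (k - 1) "") + pvVal (PySem.List.pyGetD xs (k + 1) "")) = true) ↔
    pvP (xs.map pvVal) := by
  set vals := xs.map pvVal with hv
  have hlv : vals.length = xs.length := by simp [hv]
  have hx1 : (xs.length == 1) = false := by simp; omega
  have hVal : ∀ (j : Nat) (h : j < xs.length), pvVal (xs[j]'h) = vals.getD j 0 := by
    intro j h
    rw [List.getD_eq_getElem _ _ (by omega)]
    simp [hv]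
  have hPy : ∀ (j : Nat), j < xs.length → pvVal (PySem.List.pyGetD xs (j : Int) "") = vals.getD j 0 := by
    intro j h
    rw [pyGetD_val xs j h, ← hv]
  rw [any_enumerate_iff]
  unfold pvP
  rw [hlv]
  constructor
  · rintro ⟨k, hk, hC⟩
    simp only [hx1, Bool.false_eq_true, if_false] at hC
    by_cases hk0 : k = 0
    · subst hk0
      simp only [Nat.cast_zero, BEq.rfl, if_true, zero_add] at hC
      rw [beq_iff_eq, hVal 0 (by omega), show (1:Int) = ((1:Nat):Int) by norm_num,
          hPy 1 (by omega)] at hC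
      exact Or.inl hC
    · by_cases hklast : k = xs.length - 1
      · subst hklast
        have hne0 : ¬ (((xs.length - 1 : Nat) : Int) == 0) = true := by simp; omega
        have heq : (((xs.length - 1 : Nat) : Int) == (xs.length : Int) - 1) = true := by simp; omega
        simp only [if_neg hne0, if_pos heq] at hC
        rw [beq_iff_eq, hVal (xs.length - 1) (by omega),
            show ((xs.length - 1 : Nat) : Int) - 1 = ((xs.length - 2 : Nat) : Int) by omega,
            hPy (xs.length - 2) (by omega)] at hC
        exact Or.inr (Or.inl hC)
      · have hne0' : ¬ (((k : Nat) : Int) == 0) = true := by simp; omega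
        have hnel : ¬ (((k : Nat) : Int) == (xs.length : Int) - 1) = true := by simp; omega
        simp only [if_neg hne0', if_neg hnel] at hC
        rw [beq_iff_eq, hVal k (by omega),
            show ((k : Nat) : Int) - 1 = ((k - 1 : Nat) : Int) by omega,
            show ((k : Nat) : Int) + 1 = ((k + 1 : Nat) : Int) by omega,
            hPy (k - 1) (by omega), hPy (k + 1) (by omega)] at hC
        refine Or.inr (Or.inr ⟨k - 1, by omega, ?_⟩)
        rw [show k - 1 + 2 = k + 1 by omega, show k - 1 + 1 = k by omega]
        omega
  · rintro (h | h | ⟨j, hj, hf⟩)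
    · refine ⟨0, by omega, ?_⟩
      simp only [hx1, Bool.false_eq_true, if_false, Nat.cast_zero, BEq.rfl, if_true, zero_add]
      rw [beq_iff_eq, hVal 0 (by omega), show (1:Int) = ((1:Nat):Int) by norm_num,
          hPy 1 (by omega)]
      exact h
    · refine ⟨xs.length - 1, by omega, ?_⟩
      have hne0 : ¬ (((xs.length - 1 : Nat) : Int) == 0) = true := by simp; omega
      have heq : (((xs.length - 1 : Nat) : Int) == (xs.length : Int) - 1) = true := by simp; omega
      simp only [hx1, Bool.false_eq_true, if_false, if_neg hne0, if_pos heq]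
      rw [beq_iff_eq, hVal (xs.length - 1) (by omega),
          show ((xs.length - 1 : Nat) : Int) - 1 = ((xs.length - 2 : Nat) : Int) by omega,
          hPy (xs.length - 2) (by omega)]
      exact h
    · refine ⟨j + 1, by omega, ?_⟩
      simp only [hx1, Bool.false_eq_true, if_false]
      have hne0 : ¬ (((j + 1 : Nat) : Int) == 0) = true := by simp; omega
      have hnel : ¬ (((j + 1 : Nat) : Int) == (xs.length : Int) - 1) = true := by simp; omega
      rw [if_neg hne0, if_neg hnel]
      rw [beq_iff_eq, hVal (j + 1) (by omega),
          show ((j + 1 : Nat) : Int) - 1 = ((j : Nat) : Int) by omega,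
          show ((j + 1 : Nat) : Int) + 1 = ((j + 2 : Nat) : Int) by omega,
          hPy j (by omega), hPy (j + 2) (by omega)]
      omega

-- per-inner-list equivalence: A's enumerate scan equals B's difference-table check
theorem inner_eq (i : List String) :
    (PySem.List.enumerate i).any (fun kv =>
      let k := kv.1
      let v := kv.2
      if i.length == 1 then
        pvVal v == 0
      else if k == 0 then
        pvVal v == pvVal (PySem.List.pyGetD i (k + 1) "")
      else if k == (i.length : Int) - 1 then
        pvVal v == pvVal (PySem.List.pyGetD i (k - 1) "")
      else
        pvVal v == pvVal (PySem.List.pyGetD i (k - 1) "") + pvVal (PySem.List.pyGetD i (k + 1) "")) =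
    pvHit (i.map pvVal) := by
  match i with
  | [] => rfl
  | [a] =>
    simp [pvHit, PySem.List.enumerate_cons, PySem.List.enumerate_nil, PySem.List.pyGetD_zero_cons]
  | a :: b :: r =>
    rw [Bool.eq_iff_iff, A_any_iff (a :: b :: r) (by simp),
        pvHit_iff ((a :: b :: r).map pvVal) (by simp)]

-- ===== VERDICT (by name: the statement is the Claim_ definition above) =====
theorem leidub_anagramm_spec : Claim_equal_leidub_anagramm := by
  intro t _
  unfold Spec_leidub_anagramm leidub_anagramm leidub_anagramm_alt
  exact congrArg t.any (funext inner_eq)
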